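-- pv_equiv track=rewrite | github.com/ahuja-gautam/OMR | Unnayan_Checker.py | shuffle_answers
-- ===== SOURCE A (Python) =====
-- def shuffle_answers(answer, num_q):
--     temp=[]
--     if(num_q==30):
--         for i in range(0,len(answer),2):
--             temp.append(answer[i])
--         for i in range(1,len(answer),2):
--             temp.append(answer[i])
--     else:
--         for i in range(0,len(answer),3):
--             temp.append(answer[i])
--         for i in range(1,len(answer),3):
--             temp.append(answer[i])
--         for i in range(2,len(answer),3):
--             temp.append(answer[i])
--     return temp
-- ===== SOURCE B (Python) =====
-- def shuffle_answers(answer, num_q):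
--     stride = 2 if num_q == 30 else 3
--     buckets = [[] for _ in range(stride)]
--     for i, x in enumerate(answer):
--         buckets[i % stride].append(x)
--     return [x for b in buckets for x in b]
-- ===== Notes on version B (the rewrite author's own statement) =====
-- stated objective: simpler
-- what changed: A's two (or three) separate strided index passes are replaced by a single enumerate pass that deals each element into one of stride round-robin buckets, then concatenates the buckets.
import Mathlib
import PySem

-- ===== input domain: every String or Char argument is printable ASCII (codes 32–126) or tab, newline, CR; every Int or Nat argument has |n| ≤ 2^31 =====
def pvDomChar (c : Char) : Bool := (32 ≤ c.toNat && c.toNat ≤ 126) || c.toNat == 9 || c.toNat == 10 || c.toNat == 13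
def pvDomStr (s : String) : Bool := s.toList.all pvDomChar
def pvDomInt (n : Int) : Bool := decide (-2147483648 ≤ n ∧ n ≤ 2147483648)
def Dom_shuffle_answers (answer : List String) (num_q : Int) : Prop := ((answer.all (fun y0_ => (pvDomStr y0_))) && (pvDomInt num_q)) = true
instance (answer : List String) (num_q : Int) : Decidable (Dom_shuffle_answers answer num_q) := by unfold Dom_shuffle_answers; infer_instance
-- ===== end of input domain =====

-- B replaces A's two/three strided index passes with a single enumerate pass into round-robin buckets (same O(n) cost, simpler decomposition).

-- ===== PORT A =====
def shuffle_answers (answer : List String) (num_q : Int) : List String :=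
  let temp : List String := []
  if num_q == 30 then
    let temp := (PySem.List.pyRange 0 (answer.length : Int) 2).foldl
      (fun acc i => acc ++ [PySem.List.pyGetD answer i ""]) temp
    let temp := (PySem.List.pyRange 1 (answer.length : Int) 2).foldl
      (fun acc i => acc ++ [PySem.List.pyGetD answer i ""]) temp
    temp
  else
    let temp := (PySem.List.pyRange 0 (answer.length : Int) 3).foldl
      (fun acc i => acc ++ [PySem.List.pyGetD answer i ""]) temp
    let temp := (PySem.List.pyRange 1 (answer.length : Int) 3).foldl
      (fun acc i => acc ++ [PySem.List.pyGetD answer i ""]) temp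
    let temp := (PySem.List.pyRange 2 (answer.length : Int) 3).foldl
      (fun acc i => acc ++ [PySem.List.pyGetD answer i ""]) temp
    temp

-- ===== PORT B =====
def shuffle_answers_alt (answer : List String) (num_q : Int) : List String :=
  let stride : Nat := if num_q == 30 then 2 else 3
  let buckets : List (List String) := (List.range stride).map (fun _ => ([] : List String))
  let buckets := (PySem.List.enumerate answer).foldl
    (fun bs p => bs.modify (PySem.Int.mod p.1 (stride : Int)).toNat (fun b => b ++ [p.2])) buckets
  buckets.flatMap id

-- ===== PRECONDITION & SPEC =====
def Spec_shuffle_answers (answer : List String) (num_q : Int) (out : List String) : Prop := out = shuffle_answers_alt answer num_q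
instance (answer : List String) (num_q : Int) (out : List String) : Decidable (Spec_shuffle_answers answer num_q out) := by unfold Spec_shuffle_answers; infer_instance

-- ===== CLAIM (what is proved, stated in full; the proofs are below) =====
def Claim_equal_shuffle_answers : Prop := ∀ (answer : List String) (num_q : Int), Dom_shuffle_answers answer num_q → Spec_shuffle_answers answer num_q (shuffle_answers answer num_q)

-- ===== LEMMAS AND PROOFS =====

-- pvSel k j xs = the elements of xs at positions ≡ j (mod k), for j < k
def pvSel (k : Nat) : Nat → List String → List String
  | _, [] => []
  | 0, x :: xs => x :: pvSel k (k - 1) xs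
  | j+1, _ :: xs => pvSel k j xs

theorem pvRange_nil (a b k : Int) (hk : 0 < k) (h : b ≤ a) :
    PySem.List.pyRange a b k = [] := by
  rw [PySem.List.pyRange_of_pos a b hk]
  simp [show ¬ a < b by omega]

theorem pvRange_cons (a b k : Int) (hk : 0 < k) (h : a < b) :
    PySem.List.pyRange a b k = a :: PySem.List.pyRange (a + k) b k := by
  rw [PySem.List.pyRange_of_pos a b hk, PySem.List.pyRange_of_pos (a + k) b hk]
  by_cases h2 : a + k < b
  · have hq : (b - a + k - 1) / k = (b - (a + k) + k - 1) / k + 1 := by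
      have : b - a + k - 1 = (b - (a + k) + k - 1) + 1 * k := by ring
      rw [this, Int.add_mul_ediv_right _ _ (by omega)]
    have hnn : 0 ≤ (b - (a + k) + k - 1) / k := by
      apply Int.ediv_nonneg <;> omega
    rw [if_pos h, if_pos h2, hq]
    rw [show ((b - (a + k) + k - 1) / k + 1).toNat = ((b - (a + k) + k - 1) / k).toNat + 1 by omega]
    rw [List.range_succ_eq_map, List.map_cons, List.map_map]
    congr 1
    · simp
    · apply List.map_congr_left
      intro m _
      simp only [Function.comp_apply]
      push_cast
      ring
  · have h1 : 1 ≤ (b - a + k - 1) / k := by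
      rw [Int.le_ediv_iff_mul_le hk]; omega
    have hlt : (b - a + k - 1) / k < 2 := by
      rw [Int.ediv_lt_iff_lt_mul hk]; omega
    have hq : (b - a + k - 1) / k = 1 := by omega
    rw [if_pos h, if_neg h2, hq]
    simp

theorem pvShift (x : String) (xs : List String) (j k : Nat) (hj : 1 ≤ j) (hk : 0 < k) :
    (PySem.List.pyRange (j : Int) (((x :: xs).length : Nat) : Int) (k : Int)).map
      (fun i => PySem.List.pyGetD (x :: xs) i "") =
    (PySem.List.pyRange (((j - 1 : Nat)) : Int) ((xs.length : Nat) : Int) (k : Int)).map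
      (fun i => PySem.List.pyGetD xs i "") := by
  have hkz : (0 : Int) < (k : Int) := by exact_mod_cast hk
  rw [PySem.List.pyRange_of_pos _ _ hkz, PySem.List.pyRange_of_pos _ _ hkz]
  have hiff : ((j : Int) < (((x :: xs).length : Nat) : Int)) ↔ (((j - 1 : Nat) : Int) < ((xs.length : Nat) : Int)) := by
    simp only [List.length_cons]; omega
  have hval : ((((x :: xs).length : Nat) : Int) - (j : Int) + (k : Int) - 1) = (((xs.length : Nat) : Int) - ((j - 1 : Nat) : Int) + (k : Int) - 1) := by
    simp only [List.length_cons]; omega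
  rw [hval, if_congr hiff rfl rfl]
  rw [List.map_map, List.map_map]
  apply List.map_congr_left
  intro m _
  simp only [Function.comp_apply]
  have h1 : ((j - 1 : Nat) : Int) + (k : Int) * (m : Int) = (((j - 1) + k * m : Nat) : Int) := by push_cast; ring
  have h2 : (j : Int) + (k : Int) * (m : Int) = ((((j - 1) + k * m) + 1 : Nat) : Int) := by push_cast; omega
  rw [h1, h2, PySem.List.pyGetD_natCast, PySem.List.pyGetD_natCast, List.getD_cons_succ]

theorem pvSel_eq (k : Nat) (hk : 0 < k) (xs : List String) :
    ∀ (j : Nat), j < k →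
    (PySem.List.pyRange (j : Int) ((xs.length : Nat) : Int) (k : Int)).map
      (fun i => PySem.List.pyGetD xs i "") = pvSel k j xs := by
  induction xs with
  | nil =>
    intro j hj
    rw [pvRange_nil _ _ _ (by exact_mod_cast hk) (by simp)]
    simp [pvSel]
  | cons x xs ih =>
    intro j hj
    match j with
    | 0 =>
      simp only [Nat.cast_zero]
      rw [pvRange_cons 0 _ _ (by exact_mod_cast hk) (by simp only [List.length_cons]; omega)]
      rw [List.map_cons, PySem.List.pyGetD_zero_cons]
      rw [show ((0 : Int) + (k : Int)) = ((k : Nat) : Int) by omega]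
      rw [pvShift x xs k k hk hk, ih (k - 1) (by omega)]
      simp [pvSel]
    | j+1 =>
      rw [pvShift x xs (j+1) k (by omega) hk]
      simp only [Nat.add_sub_cancel]
      rw [ih j (by omega)]
      simp [pvSel]

theorem pvFold2 (xs : List String) :
    ∀ (s : Nat) (b0 b1 : List String),
    (PySem.List.enumerate xs ((s : Nat) : Int)).foldl
      (fun bs p => bs.modify (PySem.Int.mod p.1 ((2 : Nat) : Int)).toNat (fun b => b ++ [p.2])) [b0, b1] =
    if s % 2 = 0 then [b0 ++ pvSel 2 0 xs, b1 ++ pvSel 2 1 xs]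
    else [b0 ++ pvSel 2 1 xs, b1 ++ pvSel 2 0 xs] := by
  induction xs with
  | nil =>
    intro s b0 b1
    simp only [PySem.List.enumerate, List.foldl_nil]
    split_ifs <;> simp [pvSel]
  | cons x xs ih =>
    intro s b0 b1
    rw [PySem.List.enumerate_cons, List.foldl_cons]
    have hmod : (PySem.Int.mod ((s : Nat) : Int) ((2 : Nat) : Int)).toNat = s % 2 := by
      rw [PySem.Int.mod_natCast]; omega
    have hs1 : ((s : Nat) : Int) + 1 = ((s + 1 : Nat) : Int) := by push_cast; ring
    have h2 : s % 2 = 0 ∨ s % 2 = 1 := by omega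
    rcases h2 with h | h
    · have hstate : ([b0, b1].modify (PySem.Int.mod ((s : Nat) : Int) ((2 : Nat) : Int)).toNat (fun b => b ++ [x])) = [b0 ++ [x], b1] := by
        rw [hmod, h]; rfl
      simp only [hstate, hs1, ih (s+1) (b0 ++ [x]) b1]
      rw [if_neg (by omega), if_pos h]
      simp [pvSel]
    · have hstate : ([b0, b1].modify (PySem.Int.mod ((s : Nat) : Int) ((2 : Nat) : Int)).toNat (fun b => b ++ [x])) = [b0, b1 ++ [x]] := by
        rw [hmod, h]; rfl
      simp only [hstate, hs1, ih (s+1) b0 (b1 ++ [x])]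
      rw [if_pos (by omega), if_neg (by omega)]
      simp [pvSel]

theorem pvFold3 (xs : List String) :
    ∀ (s : Nat) (b0 b1 b2 : List String),
    (PySem.List.enumerate xs ((s : Nat) : Int)).foldl
      (fun bs p => bs.modify (PySem.Int.mod p.1 ((3 : Nat) : Int)).toNat (fun b => b ++ [p.2])) [b0, b1, b2] =
    if s % 3 = 0 then [b0 ++ pvSel 3 0 xs, b1 ++ pvSel 3 1 xs, b2 ++ pvSel 3 2 xs]
    else if s % 3 = 1 then [b0 ++ pvSel 3 2 xs, b1 ++ pvSel 3 0 xs, b2 ++ pvSel 3 1 xs]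
    else [b0 ++ pvSel 3 1 xs, b1 ++ pvSel 3 2 xs, b2 ++ pvSel 3 0 xs] := by
  induction xs with
  | nil =>
    intro s b0 b1 b2
    simp only [PySem.List.enumerate, List.foldl_nil]
    split_ifs <;> simp [pvSel]
  | cons x xs ih =>
    intro s b0 b1 b2
    rw [PySem.List.enumerate_cons, List.foldl_cons]
    have hmod : (PySem.Int.mod ((s : Nat) : Int) ((3 : Nat) : Int)).toNat = s % 3 := by
      rw [PySem.Int.mod_natCast]; omega
    have hs1 : ((s : Nat) : Int) + 1 = ((s + 1 : Nat) : Int) := by push_cast; ring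
    have h3 : s % 3 = 0 ∨ s % 3 = 1 ∨ s % 3 = 2 := by omega
    rcases h3 with h | h | h
    · have hstate : ([b0, b1, b2].modify (PySem.Int.mod ((s : Nat) : Int) ((3 : Nat) : Int)).toNat (fun b => b ++ [x])) = [b0 ++ [x], b1, b2] := by
        rw [hmod, h]; rfl
      simp only [hstate, hs1, ih (s+1) (b0 ++ [x]) b1 b2]
      rw [if_neg (by omega), if_pos (by omega), if_pos h]
      simp [pvSel]
    · have hstate : ([b0, b1, b2].modify (PySem.Int.mod ((s : Nat) : Int) ((3 : Nat) : Int)).toNat (fun b => b ++ [x])) = [b0, b1 ++ [x], b2] := by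
        rw [hmod, h]; rfl
      simp only [hstate, hs1, ih (s+1) b0 (b1 ++ [x]) b2]
      rw [if_neg (by omega), if_neg (by omega), if_neg (by omega), if_pos h]
      simp [pvSel]
    · have hstate : ([b0, b1, b2].modify (PySem.Int.mod ((s : Nat) : Int) ((3 : Nat) : Int)).toNat (fun b => b ++ [x])) = [b0, b1, b2 ++ [x]] := by
        rw [hmod, h]; rfl
      simp only [hstate, hs1, ih (s+1) b0 b1 (b2 ++ [x])]
      rw [if_pos (by omega), if_neg (by omega), if_neg (by omega)]
      simp [pvSel]

-- ===== VERDICT (by name: the statement is the Claim_ definition above) =====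
theorem shuffle_answers_spec : Claim_equal_shuffle_answers := by
  intro answer num_q _
  unfold Spec_shuffle_answers shuffle_answers shuffle_answers_alt
  by_cases h : (num_q == 30) = true
  · simp only [h, if_pos]
    rw [PySem.List.foldl_append_singleton_eq_map, PySem.List.foldl_append_singleton_eq_map]
    have e0 := pvSel_eq 2 (by omega) answer 0 (by omega)
    have e1 := pvSel_eq 2 (by omega) answer 1 (by omega)
    simp only [Nat.cast_ofNat, Nat.cast_zero, Nat.cast_one] at e0 e1
    rw [e0, e1]
    have hf := pvFold2 answer 0 [] []
    simp only [Nat.cast_zero] at hf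
    rw [show ((List.range 2).map (fun _ => ([] : List String))) = [[], []] from rfl]
    rw [hf]
    simp
  · simp only [h, if_neg, Bool.false_eq_true, not_false_iff]
    rw [PySem.List.foldl_append_singleton_eq_map, PySem.List.foldl_append_singleton_eq_map,
        PySem.List.foldl_append_singleton_eq_map]
    have e0 := pvSel_eq 3 (by omega) answer 0 (by omega)
    have e1 := pvSel_eq 3 (by omega) answer 1 (by omega)
    have e2 := pvSel_eq 3 (by omega) answer 2 (by omega)
    simp only [Nat.cast_ofNat, Nat.cast_zero, Nat.cast_one] at e0 e1 e2
    rw [e0, e1, e2]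
    have hf := pvFold3 answer 0 [] [] []
    simp only [Nat.cast_zero] at hf
    rw [show ((List.range 3).map (fun _ => ([] : List String))) = [[], [], []] from rfl]
    rw [hf]
    simp
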